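-- pv_equiv track=rewrite | github.com/H9919/No-audits | services/sds_ingest.py | _is_generic_text
-- ===== SOURCE A (Python) =====
-- def _is_generic_text(text: str) -> bool:
--     """Check if text is too generic to be a product name"""
--     generic_terms = [
--         "product", "chemical", "substance", "material", "solution",
--         "mixture", "compound", "agent", "formula", "preparation",
--         "identification", "name", "title", "header", "section"
--     ]
--
--     text_lower = text.lower()
--     return any(term in text_lower for term in generic_terms) and len(text.split()) < 3
-- ===== SOURCE B (Python) =====
-- GENERIC_TERMS = [
--     "product", "chemical", "substance", "material", "solution",
--     "mixture", "compound", "agent", "formula", "preparation",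
--     "identification", "name", "title", "header", "section"
-- ]
--
--
-- def _is_generic_text(text: str) -> bool:
--     """Check if text is too generic to be a product name."""
--     # Texts of 3+ words are never generic.
--     if len(text.split()) >= 3:
--         return False
--     # Streaming multi-pattern matcher: one pass over the lowered text,
--     # carrying the set of partial matches in progress ("active" = the
--     # still-unmatched remainder of each candidate term).  A term is a
--     # substring exactly when some partial match completes.
--     active = []
--     for ch in text.lower():
--         nxt = []
--         for rest in active + GENERIC_TERMS:
--             if rest[0] == ch:
--                 if len(rest) == 1:
--                     return True
--                 nxt.append(rest[1:])
--         active = nxt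
--     return False
-- ===== Notes on version B (the rewrite author's own statement) =====
-- stated objective: alternative
-- what changed: B decides the word-count test first, then replaces A's per-term substring rescans by a streaming multi-pattern matcher: one left-to-right pass over the lowered text that carries the list of partial matches in progress and reports a hit when one completes.
import Mathlib
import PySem

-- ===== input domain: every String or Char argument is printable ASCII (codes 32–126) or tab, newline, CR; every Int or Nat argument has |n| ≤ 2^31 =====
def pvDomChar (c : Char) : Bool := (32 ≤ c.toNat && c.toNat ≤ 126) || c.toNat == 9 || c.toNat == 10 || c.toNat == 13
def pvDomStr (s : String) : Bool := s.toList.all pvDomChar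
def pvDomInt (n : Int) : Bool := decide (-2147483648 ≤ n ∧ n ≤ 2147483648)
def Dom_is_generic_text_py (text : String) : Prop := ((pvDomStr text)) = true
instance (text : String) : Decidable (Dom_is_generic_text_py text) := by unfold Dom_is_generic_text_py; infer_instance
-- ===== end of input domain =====

-- B decides the word-count test first, then replaces A's per-term substring rescans
-- by a streaming multi-pattern matcher: one pass over the lowered text carrying the
-- partial matches in progress; alternative decomposition, same result.

-- the constant list of generic terms (data used by both ports)
def genericTerms : List String :=
  ["product", "chemical", "substance", "material", "solution",
   "mixture", "compound", "agent", "formula", "preparation",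
   "identification", "name", "title", "header", "section"]

-- ===== PORT A =====
def is_generic_text_py (text : String) : Bool :=
  let text_lower := PySem.Str.lower text
  (genericTerms.any (fun term => PySem.Str.isIn term text_lower))
    && decide ((PySem.Str.split₀ text).length < 3)

-- ===== PORT B =====
-- the terms as character lists (B indexes/slices them character-wise)
def genericTermsChars : List (List Char) := genericTerms.map String.toList

-- B's inner loop: advance every candidate remainder by the character c;
-- `none` signals a completed match (Python's early `return True`).
def stepActive (c : Char) : List (List Char) → Option (List (List Char))
  | [] => some []
  | [] :: rs => stepActive c rs          -- empty remainder never occurs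
  | (x :: xs) :: rs =>
    if x = c then
      if xs = [] then none               -- len(rest) == 1: match complete
      else (stepActive c rs).map (xs :: ·)
    else stepActive c rs

-- B's outer loop: one pass over the characters, carrying the active remainders
def scanActive : List Char → List (List Char) → Bool
  | [], _ => false
  | c :: cs, active =>
    match stepActive c (active ++ genericTermsChars) with
    | none => true
    | some nxt => scanActive cs nxt

def is_generic_text_py_alt (text : String) : Bool :=
  if 3 ≤ (PySem.Str.split₀ text).length then false
  else scanActive (PySem.Chars.lower text.toList) []

-- ===== PRECONDITION & SPEC =====
def Spec_is_generic_text_py (text : String) (out : Bool) : Prop := out = is_generic_text_py_alt text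
instance (text : String) (out : Bool) : Decidable (Spec_is_generic_text_py text out) := by unfold Spec_is_generic_text_py; infer_instance

-- ===== CLAIM =====
def Claim_equal_is_generic_text_py : Prop := ∀ (text : String), Dom_is_generic_text_py text → Spec_is_generic_text_py text (is_generic_text_py text)

-- ===== LEMMAS AND PROOFS =====

lemma genericTermsChars_ne_nil : ∀ t ∈ genericTermsChars, t ≠ [] := by decide

-- stepActive returns `none` exactly when some remainder is the single char c
lemma stepActive_eq_none_iff (c : Char) (L : List (List Char)) :
    stepActive c L = none ↔ [c] ∈ L := by
  induction L with
  | nil => simp [stepActive]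
  | cons r rs ih =>
    match r with
    | [] => simp [stepActive, ih]
    | x :: xs =>
      by_cases hx : x = c
      · by_cases hxs : xs = []
        · subst hx hxs; simp [stepActive]
        · simp only [stepActive, if_pos hx, if_neg hxs, List.mem_cons]
          rw [Option.map_eq_none_iff, ih]
          constructor
          · exact .inr
          · rintro (h | h)
            · exact absurd h.symm (by simp [hx, hxs])
            · exact h
      · simp only [stepActive, if_neg hx, List.mem_cons]
        rw [ih]
        constructor
        · exact .inr
        · rintro (h | h)
          · exact absurd h.symm (by simp [hx])
          · exact h

-- membership in the advanced active set
lemma mem_stepActive_some (c : Char) (L nxt : List (List Char))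
    (h : stepActive c L = some nxt) (r : List Char) :
    r ∈ nxt ↔ r ≠ [] ∧ c :: r ∈ L := by
  induction L generalizing nxt with
  | nil =>
    simp only [stepActive, Option.some.injEq] at h
    subst h; simp
  | cons hd rs ih =>
    match hd with
    | [] =>
      rw [ih nxt h]; simp
    | x :: xs =>
      by_cases hx : x = c
      · by_cases hxs : xs = []
        · subst hx hxs; simp [stepActive] at h
        · subst hx
          simp only [stepActive, if_neg hxs] at h
          obtain ⟨nxt', h', rfl⟩ := Option.map_eq_some_iff.mp h
          simp only [List.mem_cons, ih nxt' h', List.cons.injEq, true_and]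
          constructor
          · rintro (rfl | ⟨hne, hmem⟩)
            · exact ⟨hxs, Or.inl rfl⟩
            · exact ⟨hne, Or.inr hmem⟩
          · rintro ⟨hne, (rfl | hmem)⟩
            · exact Or.inl rfl
            · exact Or.inr ⟨hne, hmem⟩
      · simp only [stepActive, if_neg hx] at h
        rw [ih nxt h]
        simp only [List.mem_cons, List.cons.injEq]
        constructor
        · rintro ⟨hne, hmem⟩; exact ⟨hne, Or.inr hmem⟩
        · rintro ⟨hne, (⟨hcx, _⟩ | hmem)⟩
          · exact absurd hcx.symm hx
          · exact ⟨hne, hmem⟩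

-- invariant of B's single pass: it succeeds iff some active remainder is a prefix
-- of the rest of the text, or some term occurs in the rest of the text
lemma scanActive_iff (cs : List Char) (active : List (List Char))
    (hne : ∀ r ∈ active, r ≠ []) :
    scanActive cs active = true ↔
      (∃ r ∈ active, r <+: cs) ∨ ∃ t ∈ genericTermsChars, t <:+: cs := by
  induction cs generalizing active with
  | nil =>
    simp only [scanActive, Bool.false_eq_true, false_iff]
    rintro (⟨r, hr, hpre⟩ | ⟨t, ht, hinf⟩)
    · exact hne r hr (List.prefix_nil.mp hpre)
    · exact genericTermsChars_ne_nil t ht (List.infix_nil.mp hinf)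
  | cons c cs ih =>
    have keyR : ∀ (S : List (List Char)), (∃ r ∈ S, r ≠ [] ∧ r <+: c :: cs) ↔
        ([c] ∈ S ∨ ∃ r', r' ≠ [] ∧ c :: r' ∈ S ∧ r' <+: cs) := by
      intro S
      constructor
      · rintro ⟨r, hr, hrne, hpre⟩
        match r, hrne with
        | x :: xs, _ =>
          obtain ⟨rfl, hxs⟩ := List.cons_prefix_cons.mp hpre
          by_cases h0 : xs = []
          · subst h0; exact .inl hr
          · exact .inr ⟨xs, h0, hr, hxs⟩
      · rintro (h | ⟨r', hne', hmem, hpre⟩)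
        · exact ⟨[c], h, by simp, by simp⟩
        · exact ⟨c :: r', hmem, by simp, List.cons_prefix_cons.mpr ⟨rfl, hpre⟩⟩
    cases hstep : stepActive c (active ++ genericTermsChars) with
    | none =>
      have hc : [c] ∈ active ++ genericTermsChars := (stepActive_eq_none_iff _ _).mp hstep
      simp only [scanActive, hstep, true_iff]
      rcases List.mem_append.mp hc with h | h
      · exact .inl ⟨[c], h, by simp⟩
      · exact .inr ⟨[c], h, List.IsPrefix.isInfix (by simp)⟩
    | some nxt =>
      have hnxt := mem_stepActive_some c _ nxt hstep
      simp only [scanActive, hstep]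
      rw [ih nxt (fun r hr => ((hnxt r).mp hr).1)]
      have hc : [c] ∉ active ++ genericTermsChars := by
        intro h
        rw [← stepActive_eq_none_iff c] at h
        simp [hstep] at h
      constructor
      · rintro (⟨r, hr, hpre⟩ | ⟨t, ht, hinf⟩)
        · obtain ⟨hrne, hmem⟩ := (hnxt r).mp hr
          rcases List.mem_append.mp hmem with h | h
          · exact .inl ⟨c :: r, h, List.cons_prefix_cons.mpr ⟨rfl, hpre⟩⟩
          · exact .inr ⟨c :: r, h, ((List.cons_prefix_cons.mpr ⟨rfl, hpre⟩)).isInfix⟩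
        · exact .inr ⟨t, ht, hinf.trans (List.suffix_cons c cs).isInfix⟩
      · rintro (⟨r, hr, hpre⟩ | ⟨t, ht, hinf⟩)
        · have : ∃ r' ∈ active, r' ≠ [] ∧ r' <+: c :: cs := ⟨r, hr, hne r hr, hpre⟩
          rcases (keyR active).mp (by obtain ⟨a, b, d, e⟩ := this; exact ⟨a, b, d, e⟩) with h | ⟨r', h1, h2, h3⟩
          · exact absurd (List.mem_append.mpr (.inl h)) hc
          · exact .inl ⟨r', (hnxt r').mpr ⟨h1, List.mem_append.mpr (.inl h2)⟩, h3⟩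
        · rcases List.infix_cons_iff.mp hinf with hpre | hinf'
          · have : ∃ r ∈ genericTermsChars, r ≠ [] ∧ r <+: c :: cs :=
              ⟨t, ht, genericTermsChars_ne_nil t ht, hpre⟩
            rcases (keyR genericTermsChars).mp this with h | ⟨r', h1, h2, h3⟩
            · exact absurd (List.mem_append.mpr (.inr h)) hc
            · exact .inl ⟨r', (hnxt r').mpr ⟨h1, List.mem_append.mpr (.inr h2)⟩, h3⟩
          · exact .inr ⟨t, ht, hinf'⟩

-- with no active remainders, B's pass decides exactly substring occurrence
lemma scanActive_nil_eq (cs : List Char) :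
    scanActive cs [] = genericTerms.any (fun term => PySem.Chars.isIn term.toList cs) := by
  rw [Bool.eq_iff_iff, scanActive_iff cs [] (by simp)]
  simp only [List.not_mem_nil, false_and, exists_false, false_or, List.any_eq_true,
    PySem.Chars.isIn_iff_infix, genericTermsChars, List.mem_map]
  constructor
  · rintro ⟨t, ⟨s, hs, rfl⟩, hinf⟩
    exact ⟨s, hs, hinf⟩
  · rintro ⟨s, hs, hinf⟩
    exact ⟨s.toList, ⟨s, hs, rfl⟩, hinf⟩

-- ===== VERDICT =====
theorem is_generic_text_py_spec : Claim_equal_is_generic_text_py := by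
  intro text _
  unfold Spec_is_generic_text_py is_generic_text_py is_generic_text_py_alt
  by_cases h : 3 ≤ (PySem.Str.split₀ text).length
  · simp [h, Nat.not_lt.mpr h]
  · have hlt : (PySem.Str.split₀ text).length < 3 := Nat.lt_of_not_le h
    simp only [h, hlt, decide_true, Bool.and_true, if_false]
    rw [scanActive_nil_eq]
    simp [PySem.Str.isIn, PySem.Str.lower]
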